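-- pv_equiv track=rewrite | github.com/selfxyz/self-mcp | self_mcp/tools/debugging.py | find_error_solution
-- ===== SOURCE A (Python) =====
-- def find_error_solution(content: str, error_message: str, context: str) -> str:
--     """Find error solution in troubleshooting documentation"""
--     lines = content.split('\n')
--     error_lower = error_message.lower()
--
--     # Keywords to search for based on error/context
--     search_terms = []
--     if context:
--         search_terms.append(context.replace('-', ' '))
--
--     # Extract keywords from error message
--     error_keywords = {
--         "scope": ["scope", "mismatch"],
--         "proof": ["proof", "invalid", "verification failed"],
--         "age": ["age", "older", "minimum age"],
--         "nullifier": ["nullifier", "reuse", "duplicate"],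
--         "network": ["network", "connection", "timeout"],
--         "config": ["config", "mismatch", "configuration"]
--     }
--
--     for key, keywords in error_keywords.items():
--         if any(kw in error_lower for kw in keywords):
--             search_terms.extend(keywords)
--
--     # Find relevant sections
--     relevant_sections = []
--     current_section = []
--     section_relevance = 0
--
--     for line in lines:
--         if line.startswith('#'):
--             # New section
--             if current_section and section_relevance > 0:
--                 relevant_sections.append(('\n'.join(current_section), section_relevance))
--             current_section = [line]
--             section_relevance = sum(1 for term in search_terms if term in line.lower())
--         else:
--             current_section.append(line)
--             if any(term in line.lower() for term in search_terms):
--                 section_relevance += 1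
--
--     # Add last section
--     if current_section and section_relevance > 0:
--         relevant_sections.append(('\n'.join(current_section), section_relevance))
--
--     # Sort by relevance and return top section
--     if relevant_sections:
--         relevant_sections.sort(key=lambda x: x[1], reverse=True)
--         return f"# Error Analysis\n\nError: {error_message}\n\n{relevant_sections[0][0]}"
--
--     return None
-- ===== SOURCE B (Python) =====
-- def _search_terms(error_message, context):
--     error_keywords = {
--         "scope": ["scope", "mismatch"],
--         "proof": ["proof", "invalid", "verification failed"],
--         "age": ["age", "older", "minimum age"],
--         "nullifier": ["nullifier", "reuse", "duplicate"],
--         "network": ["network", "connection", "timeout"],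
--         "config": ["config", "mismatch", "configuration"]
--     }
--     el = error_message.lower()
--     return ([context.replace('-', ' ')] if context else []) + \
--         [kw for kws in error_keywords.values() if any(k in el for k in kws) for kw in kws]
--
--
-- def _sections(lines):
--     """Partition lines into a preamble section (possibly empty) followed by
--     one section per '#'-line."""
--     secs = [[]]
--     for line in lines:
--         if line.startswith('#'):
--             secs.append([line])
--         else:
--             secs[-1].append(line)
--     return secs
--
--
-- def _score(sec, terms):
--     if sec and sec[0].startswith('#'):
--         head = sec[0].lower()
--         return sum(1 for t in terms if t in head) + \
--             sum(1 for line in sec[1:] if any(t in line.lower() for t in terms))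
--     return sum(1 for line in sec if any(t in line.lower() for t in terms))
--
--
-- def find_error_solution(content: str, error_message: str, context: str) -> str:
--     terms = _search_terms(error_message, context)
--     best, best_score = None, 0
--     for sec in _sections(content.split('\n')):
--         s = _score(sec, terms)
--         if s > best_score:
--             best, best_score = sec, s
--     if best is None:
--         return None
--     return f"# Error Analysis\n\nError: {error_message}\n\n" + '\n'.join(best)
-- ===== Notes on version B (the rewrite author's own statement) =====
-- stated objective: alternative
-- what changed: B first partitions the lines into explicit sections (preamble plus one per '#' line), scores each section with the same asymmetric rule, and picks the first strictly-best positive section by a single max-scan, replacing A's single stateful accumulation loop followed by a stable descending sort.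
import Mathlib
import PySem

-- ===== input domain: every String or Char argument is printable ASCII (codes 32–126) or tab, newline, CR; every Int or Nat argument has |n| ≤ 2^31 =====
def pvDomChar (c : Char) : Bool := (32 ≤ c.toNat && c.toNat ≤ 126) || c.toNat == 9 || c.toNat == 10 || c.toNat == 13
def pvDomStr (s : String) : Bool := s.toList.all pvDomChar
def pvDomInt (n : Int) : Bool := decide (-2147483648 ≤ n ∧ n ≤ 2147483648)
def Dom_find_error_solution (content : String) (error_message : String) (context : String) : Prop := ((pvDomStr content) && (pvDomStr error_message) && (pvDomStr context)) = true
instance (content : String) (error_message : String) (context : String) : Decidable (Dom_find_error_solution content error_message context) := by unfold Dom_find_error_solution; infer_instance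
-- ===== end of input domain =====

-- B re-decomposes A: it first partitions the lines into sections, scores each section
-- with A's exact asymmetric rule, and keeps the first strictly-best positive section by a
-- single max-scan instead of A's single stateful loop plus stable sort (objective: alternative).

-- ===== PORT A =====
-- the error_keywords table (shared data, used verbatim by both programs)
def errorKeywords : List (String × List String) :=
  [("scope", ["scope", "mismatch"]),
   ("proof", ["proof", "invalid", "verification failed"]),
   ("age", ["age", "older", "minimum age"]),
   ("nullifier", ["nullifier", "reuse", "duplicate"]),
   ("network", ["network", "connection", "timeout"]),
   ("config", ["config", "mismatch", "configuration"])]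

-- one iteration of A's 'for line in lines' loop; state = (relevant_sections, current_section, section_relevance)
def aStep (search_terms : List String) (s : List (String × Int) × List String × Int)
    (line : String) : List (String × Int) × List String × Int :=
  if PySem.Str.startswith line "#" then
    ((if s.2.1 ≠ [] ∧ 0 < s.2.2 then s.1 ++ [(PySem.Str.join "\n" s.2.1, s.2.2)] else s.1),
     [line],
     search_terms.foldl
       (fun n term => if PySem.Str.isIn term (PySem.Str.lower line) then n + 1 else n) (0 : Int))
  else
    (s.1, s.2.1 ++ [line],
     if search_terms.any (fun term => PySem.Str.isIn term (PySem.Str.lower line)) then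
       s.2.2 + 1
     else s.2.2)

def find_error_solution (content : String) (error_message : String) (context : String) : Option String :=
  let lines := (PySem.Str.split? content "\n").getD []
  let error_lower := PySem.Str.lower error_message
  let search_terms : List String := if context = "" then [] else [PySem.Str.replace context "-" " "]
  let search_terms := errorKeywords.foldl
    (fun st kv => if kv.2.any (fun kw => PySem.Str.isIn kw error_lower) then st ++ kv.2 else st)
    search_terms
  let st := lines.foldl (aStep search_terms) ([], [], 0)
  let relevant_sections :=
    if st.2.1 ≠ [] ∧ 0 < st.2.2 then st.1 ++ [(PySem.Str.join "\n" st.2.1, st.2.2)] else st.1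
  if relevant_sections ≠ [] then
    match PySem.List.sorted relevant_sections (fun x => x.2) true with
    | top :: _ => some ("# Error Analysis\n\nError: " ++ error_message ++ "\n\n" ++ top.1)
    | [] => none
  else none

-- ===== PORT B =====
def bSearchTerms (error_message : String) (context : String) : List String :=
  let el := PySem.Str.lower error_message
  (if context = "" then [] else [PySem.Str.replace context "-" " "]) ++
    (errorKeywords.filter (fun kv => kv.2.any (fun k => PySem.Str.isIn k el))).flatMap (fun kv => kv.2)

-- partition the lines: a (possibly empty) preamble section, then one section per '#' line
def bSections (lines : List String) : List (List String) :=
  lines.foldl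
    (fun secs line =>
      if PySem.Str.startswith line "#" then secs ++ [[line]]
      else secs.dropLast ++ [(secs.getLast?.getD []) ++ [line]])
    [[]]

def bLineHits (terms : List String) (line : String) : Bool :=
  terms.any (fun t => PySem.Str.isIn t (PySem.Str.lower line))

def bScore (terms : List String) (sec : List String) : Int :=
  match sec with
  | [] => 0
  | head :: rest =>
    if PySem.Str.startswith head "#" then
      ((terms.countP (fun t => PySem.Str.isIn t (PySem.Str.lower head)) : Nat) : Int)
        + ((rest.countP (bLineHits terms) : Nat) : Int)
    else (((head :: rest).countP (bLineHits terms) : Nat) : Int)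

-- the max-scan: first section with a strictly greater positive score wins
def bStep (terms : List String) (st : Option (List String) × Int) (sec : List String) :
    Option (List String) × Int :=
  if bScore terms sec > st.2 then (some sec, bScore terms sec) else st

def find_error_solution_alt (content : String) (error_message : String) (context : String) : Option String :=
  let terms := bSearchTerms error_message context
  let r := (bSections ((PySem.Str.split? content "\n").getD [])).foldl (bStep terms) (none, 0)
  match r.1 with
  | none => none
  | some best =>
    some ("# Error Analysis\n\nError: " ++ error_message ++ "\n\n" ++ PySem.Str.join "\n" best)

-- ===== PRECONDITION & SPEC =====
def Spec_find_error_solution (content : String) (error_message : String) (context : String) (out : Option String) : Prop := out = find_error_solution_alt content error_message context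
instance (content : String) (error_message : String) (context : String) (out : Option String) : Decidable (Spec_find_error_solution content error_message context out) := by unfold Spec_find_error_solution; infer_instance

-- ===== CLAIM (what is proved, stated in full; the proofs are below) =====
def Claim_equal_find_error_solution : Prop := ∀ (content : String) (error_message : String) (context : String), Dom_find_error_solution content error_message context → Spec_find_error_solution content error_message context (find_error_solution content error_message context)

-- ===== LEMMAS AND PROOFS =====

-- left-recursive form of B's partition
def secsAux (cur : List String) : List String → List (List String)
  | [] => [cur]
  | l :: ls =>
    if PySem.Str.startswith l "#" then cur :: secsAux [l] ls else secsAux (cur ++ [l]) ls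

-- A's scoring of a finished section list
def scored (terms : List String) (secs : List (List String)) : List (String × Int) :=
  secs.filterMap (fun s =>
    if 0 < bScore terms s then some (PySem.Str.join "\n" s, bScore terms s) else none)

theorem bSections_eq_secsAux (lines : List String) (done : List (List String)) (cur : List String) :
    lines.foldl
      (fun secs line =>
        if PySem.Str.startswith line "#" then secs ++ [[line]]
        else secs.dropLast ++ [(secs.getLast?.getD []) ++ [line]])
      (done ++ [cur]) = done ++ secsAux cur lines := by
  induction lines generalizing done cur with
  | nil => simp [secsAux]
  | cons l ls ih =>
    simp only [List.foldl_cons, secsAux]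
    by_cases h : PySem.Str.startswith l "#" = true
    · simp only [h, if_true]
      have := ih (done ++ [cur]) [l]
      simpa using this
    · simp only [h, Bool.false_eq_true, if_false]
      have hdrop : (done ++ [cur]).dropLast = done := by simp
      have hlast : (done ++ [cur]).getLast?.getD [] = cur := by simp
      rw [hdrop, hlast, ih done (cur ++ [l])]

theorem bScore_append_body (terms : List String) (cur : List String) (l : String)
    (h : PySem.Str.startswith l "#" = false) :
    bScore terms (cur ++ [l]) =
      if bLineHits terms l then bScore terms cur + 1 else bScore terms cur := by
  cases cur with
  | nil =>
    simp only [List.nil_append, bScore, h, Bool.false_eq_true, if_false]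
    by_cases hhit : bLineHits terms l = true
    · simp [hhit]
    · simp [hhit]
  | cons hd tl =>
    simp only [List.cons_append, bScore]
    by_cases hh : PySem.Str.startswith hd "#" = true
    · simp only [hh, if_true, List.countP_append, List.countP_cons, List.countP_nil]
      by_cases hhit : bLineHits terms l = true
      · simp only [hhit, if_true]; push_cast; ring
      · simp only [hhit, Bool.false_eq_true, if_false]; push_cast; ring
    · simp only [hh, Bool.false_eq_true, if_false]
      have hsplit : hd :: (tl ++ [l]) = (hd :: tl) ++ [l] := by simp
      rw [hsplit, List.countP_append]
      by_cases hhit : bLineHits terms l = true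
      · simp only [List.countP_cons, List.countP_nil, hhit, if_true]; push_cast; ring
      · simp only [List.countP_cons, List.countP_nil, hhit, Bool.false_eq_true, if_false]
        push_cast; ring

theorem bScore_header (terms : List String) (l : String)
    (h : PySem.Str.startswith l "#" = true) :
    bScore terms [l] = (terms.countP (fun t => PySem.Str.isIn t (PySem.Str.lower l)) : Int) := by
  simp only [bScore]
  rw [if_pos h]
  simp

-- what A appends when a section is closed: exactly 'scored' of that one section,
-- provided the relevance counter equals bScore of the current section
theorem aClose_eq (terms : List String) (R : List (String × Int)) (cur : List String) :
    (if cur ≠ [] ∧ 0 < bScore terms cur then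
        R ++ [(PySem.Str.join "\n" cur, bScore terms cur)]
      else R) = R ++ scored terms [cur] := by
  have hnil : bScore terms ([] : List String) = 0 := rfl
  by_cases hc : cur = []
  · subst hc; simp [scored, hnil]
  · by_cases hp : 0 < bScore terms cur
    · simp [scored, hc, hp]
    · simp [scored, hc, hp]

-- MAIN LOOP INVARIANT: running A's loop from a state (R, cur, bScore cur) and then
-- closing the last section yields R ++ scored (secsAux cur lines)
theorem aLoop_eq (terms : List String) (lines : List String) (R : List (String × Int))
    (cur : List String) :
    (let st := lines.foldl (aStep terms) (R, cur, bScore terms cur);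
     if st.2.1 ≠ [] ∧ 0 < st.2.2 then st.1 ++ [(PySem.Str.join "\n" st.2.1, st.2.2)] else st.1)
      = R ++ scored terms (secsAux cur lines) := by
  induction lines generalizing R cur with
  | nil =>
    simp only [List.foldl_nil, secsAux]
    exact aClose_eq terms R cur
  | cons l ls ih =>
    simp only [List.foldl_cons, secsAux]
    by_cases h : PySem.Str.startswith l "#" = true
    · have hstep : aStep terms (R, cur, bScore terms cur) l
          = (R ++ scored terms [cur], [l], bScore terms [l]) := by
        simp only [aStep, h, if_true]
        refine congrArg₂ (fun a c => (a, [l], c)) (aClose_eq terms R cur) ?_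
        rw [bScore_header terms l h,
            PySem.List.foldl_if_add_one (fun t => PySem.Str.isIn t (PySem.Str.lower l)) terms 0]
        simp
      rw [hstep, ih (R ++ scored terms [cur]) [l], h, if_pos rfl]
      have hsplit : cur :: secsAux [l] ls = [cur] ++ secsAux [l] ls := rfl
      simp only [scored, hsplit, List.filterMap_append, List.append_assoc]
    · have hb : PySem.Str.startswith l "#" = false := by simpa using h
      have hstep : aStep terms (R, cur, bScore terms cur) l
          = (R, cur ++ [l], bScore terms (cur ++ [l])) := by
        simp only [aStep, hb, Bool.false_eq_true, if_false]
        rw [bScore_append_body terms cur l hb]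
        by_cases hhit : bLineHits terms l = true
        · simp [bLineHits] at hhit; simp [bLineHits, hhit]
        · simp [bLineHits] at hhit; simp [bLineHits]
      rw [hstep, ih R (cur ++ [l]), hb]
      simp

-- A's head-of-stable-descending-sort, as a function
def aPick (rs : List (String × Int)) : Option (String × Int) :=
  (PySem.List.sorted rs (fun x => x.2) true).head?

theorem aPick_append (rs : List (String × Int)) (p : String × Int) :
    aPick (rs ++ [p]) = match aPick rs with
      | none => some p
      | some m => if m.2 < p.2 then some p else some m := by
  unfold aPick
  rw [PySem.List.sorted_rev_eq_foldl_insertBy (rs ++ [p]) (fun x => x.2),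
      PySem.List.sorted_rev_eq_foldl_insertBy rs (fun x => x.2)]
  rw [List.foldl_append]
  simp only [List.foldl_cons, List.foldl_nil]
  cases hs : List.foldl
      (fun acc x => PySem.List.insertBy (fun a b => decide (b.2 < a.2)) x acc) [] rs with
  | nil => simp [PySem.List.insertBy]
  | cons m t =>
    simp only [PySem.List.insertBy]
    by_cases hlt : m.2 < p.2
    · simp [hlt]
    · simp [hlt]

theorem aPick_eq_none_iff (rs : List (String × Int)) : aPick rs = none ↔ rs = [] := by
  unfold aPick
  rw [List.head?_eq_none_iff, PySem.List.sorted_eq_nil_iff]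

-- the bridge invariant between A's pick over scored sections and B's max-scan
theorem bridge (terms : List String) (secs : List (List String)) :
    (match aPick (scored terms secs), secs.foldl (bStep terms) (none, 0) with
      | none, (none, s) => s = 0
      | some m, (some b, s) => m.2 = s ∧ m.1 = PySem.Str.join "\n" b ∧ 0 < s
      | _, _ => False) := by
  induction secs using List.reverseRecOn with
  | nil => simp [scored, aPick, PySem.List.sorted]
  | append_singleton secs sec ih =>
    have hscored : scored terms (secs ++ [sec]) = scored terms secs ++ scored terms [sec] := by
      simp [scored]
    rw [hscored, List.foldl_append]
    simp only [List.foldl_cons, List.foldl_nil]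
    by_cases hp : 0 < bScore terms sec
    · have h1 : scored terms [sec] = [(PySem.Str.join "\n" sec, bScore terms sec)] := by
        simp [scored, hp]
      rw [h1, aPick_append]
      cases ha : aPick (scored terms secs) with
      | none =>
        rw [ha] at ih
        cases hb : (secs.foldl (bStep terms) (none, 0)) with
        | mk b1 b2 =>
          rw [hb] at ih
          cases b1 with
          | none =>
            simp only at ih
            simp [bStep, ih, hp]
          | some b => simp at ih
      | some m =>
        rw [ha] at ih
        cases hb : (secs.foldl (bStep terms) (none, 0)) with
        | mk b1 b2 =>
          rw [hb] at ih
          cases b1 with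
          | none => simp at ih
          | some b =>
            obtain ⟨h2, h3, h4⟩ := ih
            by_cases hlt : m.2 < bScore terms sec
            · simp only [bStep]
              rw [if_pos hlt, if_pos (by omega : bScore terms sec > b2)]
              exact ⟨rfl, rfl, hp⟩
            · simp only [bStep]
              rw [if_neg hlt, if_neg (by omega : ¬ bScore terms sec > b2)]
              exact ⟨h2, h3, h4⟩
    · have h1 : scored terms [sec] = [] := by simp [scored, hp]
      rw [h1, List.append_nil]
      cases ha : aPick (scored terms secs) with
      | none =>
        rw [ha] at ih
        cases hb : (secs.foldl (bStep terms) (none, 0)) with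
        | mk b1 b2 =>
          rw [hb] at ih
          cases b1 with
          | none =>
            simp only at ih
            simp [bStep, ih, hp]
          | some b => simp at ih
      | some m =>
        rw [ha] at ih
        cases hb : (secs.foldl (bStep terms) (none, 0)) with
        | mk b1 b2 =>
          rw [hb] at ih
          cases b1 with
          | none => simp at ih
          | some b =>
            obtain ⟨h2, h3, h4⟩ := ih
            simp only [bStep]
            rw [if_neg (by omega : ¬ bScore terms sec > b2)]
            exact ⟨h2, h3, h4⟩

-- A's search-term loop builds exactly bSearchTerms
theorem terms_eq (error_message context : String) :
    errorKeywords.foldl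
      (fun st kv =>
        if kv.2.any (fun kw => PySem.Str.isIn kw (PySem.Str.lower error_message)) then st ++ kv.2
        else st)
      (if context = "" then [] else [PySem.Str.replace context "-" " "])
    = bSearchTerms error_message context := by
  unfold bSearchTerms
  rw [PySem.List.foldl_if_eq_foldl_filter
        (fun kv => kv.2.any (fun kw => PySem.Str.isIn kw (PySem.Str.lower error_message)))
        (fun st kv => st ++ kv.2) errorKeywords,
      PySem.List.foldl_append_eq_flatMap]

-- ===== VERDICT (by name: the statement is the Claim_ definition above) =====
theorem find_error_solution_spec : Claim_equal_find_error_solution := by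
  intro content error_message context _
  unfold Spec_find_error_solution find_error_solution find_error_solution_alt
  simp only []
  rw [terms_eq error_message context]
  set terms := bSearchTerms error_message context with hterms
  set lines := (PySem.Str.split? content "\n").getD [] with hlines
  have hsecs : bSections lines = secsAux [] lines := by
    have := bSections_eq_secsAux lines [] []
    simpa [bSections] using this
  rw [hsecs]
  have hA := aLoop_eq terms lines [] []
  have h0 : bScore terms ([] : List String) = 0 := rfl
  rw [h0] at hA
  simp only [List.nil_append] at hA
  set st := lines.foldl (aStep terms) (([] : List (String × Int)), ([] : List String), (0 : Int))
    with hst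
  set relevant := if st.2.1 ≠ [] ∧ 0 < st.2.2
      then st.1 ++ [(PySem.Str.join "\n" st.2.1, st.2.2)] else st.1 with hrel
  have hrel_eq : relevant = scored terms (secsAux [] lines) := hA
  set scan := (secsAux [] lines).foldl (bStep terms) (none, 0) with hscan
  have hbr := bridge terms (secsAux [] lines)
  rw [← hscan] at hbr
  cases ha : aPick relevant with
  | none =>
    have hrnil : relevant = [] := (aPick_eq_none_iff relevant).mp ha
    have ha' : aPick (scored terms (secsAux [] lines)) = none := by
      rw [← hrel_eq]; exact ha
    rw [if_neg (by simp [hrnil])]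
    cases hb : scan with
    | mk b1 b2 =>
      rw [ha', hb] at hbr
      cases b1 with
      | none => rfl
      | some b => simp at hbr
  | some m =>
    have hrne : relevant ≠ [] := by
      intro hnil
      rw [hnil] at ha
      simp [aPick, PySem.List.sorted] at ha
    have ha' : aPick (scored terms (secsAux [] lines)) = some m := by
      rw [← hrel_eq]; exact ha
    cases hb : scan with
    | mk b1 b2 =>
      rw [ha', hb] at hbr
      cases b1 with
      | none => simp at hbr
      | some b =>
        obtain ⟨h2, h3, h4⟩ := hbr
        rw [if_pos hrne]
        have hhead : (PySem.List.sorted relevant (fun x => x.2) true).head? = some m := ha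
        cases hs : PySem.List.sorted relevant (fun x => x.2) true with
        | nil => rw [hs] at hhead; simp at hhead
        | cons top rest =>
          rw [hs] at hhead
          simp only [List.head?_cons, Option.some.injEq] at hhead
          subst hhead
          simp [h3]
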